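-- pv_equiv track=rewrite | github.com/gabriel-de-haro/advent_of_code_2024 | day_9/main.py | rearrange_disk_2
-- ===== SOURCE A (Python) =====
-- def find_free_space(map: list, file_size: int) -> int:
--     """Finds the first available space in the map that can accommodate a file of a given size."""
--     max_index = len(map) - file_size
--     for i in range(max_index + 1):
--         if all(c == "." for c in map[i : i + file_size]):
--             return i
--     return -1
--
-- def rearrange_disk_2(map: list) -> list:
--     """Rearranges the disk map by moving files (digits) to the leftmost free spaces in descending order of file IDs."""
--     file_ids = sorted(set(int(c) for c in map if c.isdigit()), reverse=True)
--     for file_id in file_ids: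
--         file_size = map.count(str(file_id))
--         current_positions = [i for i, c in enumerate(map) if c == str(file_id)]
--         free_space_index = find_free_space(map, file_size)
--         if free_space_index != -1 and free_space_index < current_positions[0]:
--             for pos in current_positions:
--                 map[pos] = "."
--             for i in range(free_space_index, free_space_index + file_size):
--                 map[i] = str(file_id)
--     return map
-- ===== SOURCE B (Python) =====
-- def rearrange_disk_2(map: list) -> list:
--     """Move each file (digit id, descending) to the leftmost gap of '.' cells that
--     can hold it, found by one linear run-length scan instead of per-position window checks."""
--     disk = list(map)
--     ids = sorted({int(c) for c in disk if c.isdigit()}, reverse=True)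
--     for fid in ids:
--         s = str(fid)
--         pos = [i for i, c in enumerate(disk) if c == s]
--         if not pos:
--             continue
--         size = len(pos)
--         run = 0
--         gap = -1
--         for i, c in enumerate(disk[:pos[0]]):
--             if c == ".":
--                 run += 1
--                 if run == size:
--                     gap = i - size + 1
--                     break
--             else:
--                 run = 0
--         if gap != -1:
--             for p in pos:
--                 disk[p] = "."
--             disk[gap:gap + size] = [s] * size
--     return disk
-- ===== Notes on version B (the rewrite author's own statement) =====
-- stated objective: alternative
-- what changed: B finds each file's target gap with a single run-length scan of the prefix before the file's first block (and skips ids with no positions), instead of A's find_free_space that re-checks an all-'.' window at every start index over the whole list.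
import Mathlib
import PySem

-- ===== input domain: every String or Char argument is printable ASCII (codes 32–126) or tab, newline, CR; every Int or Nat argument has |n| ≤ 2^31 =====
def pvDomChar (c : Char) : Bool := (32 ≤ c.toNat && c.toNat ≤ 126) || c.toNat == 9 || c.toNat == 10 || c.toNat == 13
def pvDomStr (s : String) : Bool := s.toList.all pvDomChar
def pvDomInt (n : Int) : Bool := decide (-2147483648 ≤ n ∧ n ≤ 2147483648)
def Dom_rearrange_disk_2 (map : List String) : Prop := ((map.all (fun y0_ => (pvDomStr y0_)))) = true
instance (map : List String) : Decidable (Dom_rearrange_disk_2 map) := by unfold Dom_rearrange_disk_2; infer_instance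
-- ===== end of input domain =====

-- B replaces A's per-start window re-checks by a single left-to-right run-length scan of the
-- prefix before the file's first block (objective: alternative). A mutates its argument in place
-- and returns it; B builds its result in a fresh list — the equivalence proved here is about the
-- RETURN value only.

-- ===== PORT A =====
def find_free_space (m : List String) (file_size : Int) : Int :=
  let max_index : Int := (m.length : Int) - file_size
  -- 'for i in range(max_index + 1): if all(...): return i' = first i satisfying, else -1
  match (PySem.List.pyRange 0 (max_index + 1) 1).find?
      (fun i => (PySem.List.slice m (some i) (some (i + file_size))).all (fun c => c == ".")) with
  | some i => i
  | none => -1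

def rearrange_disk_2 (map : List String) : List String :=
  let file_ids := PySem.List.sorted
    (PySem.Set.ofList ((map.filter (fun c => PySem.Str.strIsdigit c)).map
      (fun c => (PySem.Int.ofStr? c).getD 0)))  -- int(c): always succeeds for an ASCII digit string
    (fun x => x) true
  file_ids.foldl (fun m file_id =>
    let file_size : Int := (PySem.List.count m (PySem.Int.toStr file_id) : Int)
    let current_positions :=
      ((PySem.List.enumerate m 0).filter (fun p => p.2 == PySem.Int.toStr file_id)).map (fun p => p.1)
    let free_space_index := find_free_space m file_size
    if free_space_index ≠ -1 then
      match PySem.List.pyGet? current_positions 0 with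
      | none => m        -- Python raises IndexError here; such inputs are excluded by Pre_
      | some p0 =>
        if free_space_index < p0 then
          let m' := current_positions.foldl (fun mm pos => PySem.List.pySetD mm pos ".") m
          (PySem.List.pyRange free_space_index (free_space_index + file_size) 1).foldl
            (fun mm i => PySem.List.pySetD mm i (PySem.Int.toStr file_id)) m'
        else m
    else m) map

-- ===== PORT B =====
-- 'for i, c in enumerate(prefix): if c == ".": run += 1; if run == size: gap = ...; break else: run = 0'
def pvGapScan (cells : List String) (size : Int) (i : Int) (run : Int) : Int :=
  match cells with
  | [] => -1
  | c :: rest =>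
    if c == "." then
      if run + 1 == size then i - size + 1
      else pvGapScan rest size (i + 1) (run + 1)
    else pvGapScan rest size (i + 1) 0

def rearrange_disk_2_alt (map : List String) : List String :=
  let ids := PySem.List.sorted
    (PySem.Set.ofList ((map.filter (fun c => PySem.Str.strIsdigit c)).map
      (fun c => (PySem.Int.ofStr? c).getD 0)))
    (fun x => x) true
  ids.foldl (fun disk fid =>
    let s := PySem.Int.toStr fid
    let pos := ((PySem.List.enumerate disk 0).filter (fun p => p.2 == s)).map (fun p => p.1)
    match pos with
    | [] => disk         -- 'if not pos: continue'
    | p0 :: _ =>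
      let size : Int := (pos.length : Int)
      let gap := pvGapScan (PySem.List.slice disk none (some p0)) size 0 0
      if gap ≠ -1 then
        let d' := pos.foldl (fun dd p => PySem.List.pySetD dd p ".") disk
        (PySem.List.pyRange gap (gap + size) 1).foldl
          (fun dd i => PySem.List.pySetD dd i s) d'
      else disk) map

-- ===== PRECONDITION & SPEC =====
-- Pre_ excludes exactly the inputs on which A raises IndexError: maps containing a digit string c
-- (e.g. "00") whose canonical spelling str(int(c)) does not occur in the map, so that the file id
-- int(c) has an empty position list and A's current_positions[0] fails.
def Pre_rearrange_disk_2 (map : List String) : Prop :=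
  ∀ c ∈ map, PySem.Str.strIsdigit c = true →
    PySem.Int.toStr ((PySem.Int.ofStr? c).getD 0) ∈ map
instance (map : List String) : Decidable (Pre_rearrange_disk_2 map) := by
  unfold Pre_rearrange_disk_2; infer_instance
def pvWitness_rearrange_disk_2 : List String := ["1", ".", "0", ".", ".", "1", "x"]

def Spec_rearrange_disk_2 (map : List String) (out : List String) : Prop := out = rearrange_disk_2_alt map
instance (map : List String) (out : List String) : Decidable (Spec_rearrange_disk_2 map out) := by unfold Spec_rearrange_disk_2; infer_instance

-- ===== CLAIM (what is proved, stated in full; the proofs are below) =====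
def Claim_equal_rearrange_disk_2 : Prop := ∀ (map : List String), Dom_rearrange_disk_2 map → Pre_rearrange_disk_2 map → Spec_rearrange_disk_2 map (rearrange_disk_2 map)

-- ===== LEMMAS AND PROOFS =====

-- Window predicate: starting at j, k cells all exist and are "."
def pvQ (l : List String) (j k : Nat) : Bool :=
  decide (j + k ≤ l.length) && ((l.drop j).take k).all (fun c => c == ".")

-- First fitting window at or after lo
def pvFFW (l : List String) (k lo : Nat) : Option Nat :=
  (List.range (l.length + 1)).find? (fun j => decide (lo ≤ j) && pvQ l j k)


lemma pvRangeFind_eq_none_iff (n : Nat) (p : Nat → Bool) :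
    (List.range n).find? p = none ↔ ∀ i, i < n → p i = false := by
  rw [List.find?_eq_none]
  constructor
  · intro h i hi; simpa using h i (by simpa using hi)
  · intro h i hi
    have := h i (by simpa using hi)
    simp [this]

lemma pvRangeFind_eq_some_iff (n : Nat) (p : Nat → Bool) (j : Nat) :
    (List.range n).find? p = some j ↔ j < n ∧ p j = true ∧ ∀ i, i < j → p i = false := by
  induction n generalizing j with
  | zero => simp
  | succ n ih =>
    rw [List.range_succ, List.find?_append]
    cases h : (List.range n).find? p with
    | some k =>
      obtain ⟨hk1, hk2, hk3⟩ := (ih (j := k)).mp h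
      simp only [Option.some_or, Option.some.injEq]
      constructor
      · rintro rfl; exact ⟨by omega, hk2, hk3⟩
      · rintro ⟨h1, h2, h3⟩
        rcases Nat.lt_trichotomy j k with hlt | heq | hgt
        · have := hk3 j hlt; rw [this] at h2; simp at h2
        · omega
        · have := h3 k hgt; rw [this] at hk2; simp at hk2
    | none =>
      have hnone := (pvRangeFind_eq_none_iff n p).mp h
      simp only [Option.none_or]
      constructor
      · intro hfind
        have hj : j = n := by
          have := List.mem_of_find?_eq_some hfind
          simpa using this
        subst hj
        exact ⟨by omega, List.find?_some hfind, fun i hi => hnone i hi⟩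
      · rintro ⟨h1, h2, h3⟩
        have hj : j = n := by
          by_contra hne
          have hjn : j < n := by omega
          have := hnone j hjn
          rw [this] at h2; exact absurd h2 (by simp)
        subst hj
        simp [List.find?, h2]

lemma pvQ_iff (l : List String) (j k : Nat) :
    pvQ l j k = true ↔ j + k ≤ l.length ∧ ∀ u, j ≤ u → u < j + k → l[u]? = some "." := by
  unfold pvQ
  rw [Bool.and_eq_true, decide_eq_true_iff, List.all_eq_true]
  constructor
  · rintro ⟨hb, hall⟩
    refine ⟨hb, fun u hu1 hu2 => ?_⟩
    have hlt : u - j < ((l.drop j).take k).length := by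
      simp [List.length_take, List.length_drop]; omega
    have hmem : ((l.drop j).take k)[u - j] ∈ (l.drop j).take k := List.getElem_mem hlt
    have heq : ((l.drop j).take k)[u - j] = l[u]'(by omega) := by
      rw [List.getElem_take, List.getElem_drop]
      congr 1; omega
    have := hall _ hmem
    rw [heq] at this
    rw [List.getElem?_eq_getElem (by omega)]
    simpa using this
  · rintro ⟨hb, hdots⟩
    refine ⟨hb, fun c hc => ?_⟩
    obtain ⟨i, hi, rfl⟩ := List.mem_iff_getElem.mp hc
    have hik : i < k := by
      have := hi; simp [List.length_take, List.length_drop] at this; omega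
    have heq : ((l.drop j).take k)[i] = l[j + i]'(by
        have := hi; simp [List.length_take, List.length_drop] at this; omega) := by
      rw [List.getElem_take, List.getElem_drop]
    have := hdots (j + i) (by omega) (by omega)
    rw [List.getElem?_eq_getElem (by
       have := hi; simp [List.length_take, List.length_drop] at this; omega)] at this
    simp only [Option.some.injEq] at this
    rw [heq, this]
    simp

-- A's find_free_space is the first fitting window (from 0)
lemma pvA_char (m : List String) (k : Nat) :
    find_free_space m (k : Int) =
      (match pvFFW m k 0 with | some j => (j : Int) | none => -1) := by
  simp only [find_free_space, pvFFW]
  rw [PySem.List.pyRange_one, List.find?_map]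
  have hN : (((m.length : Int) - (k : Int) + 1) - 0).toNat = m.length + 1 - k := by omega
  rw [hN]
  have hP1 : ((fun i => (PySem.List.slice m (some i) (some (i + (k:Int)))).all (fun c => c == ".")) ∘
      (fun x : Nat => (0:Int) + ↑x)) = fun j : Nat => ((m.drop j).take k).all (fun c => c == ".") := by
    funext j
    simp [PySem.List.slice_natCast_add]
  rw [hP1]
  have hP2 : (fun j : Nat => decide (0 ≤ j) && pvQ m j k) = fun j : Nat => pvQ m j k := by
    funext j; simp
  rw [hP2]
  cases h2 : (List.range (m.length + 1)).find? (fun j : Nat => pvQ m j k) with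
  | some j =>
    obtain ⟨hj1, hj2, hj3⟩ := (pvRangeFind_eq_some_iff _ _ _).mp h2
    obtain ⟨hjk, _⟩ := (pvQ_iff m j k).mp hj2
    have hfind : (List.range (m.length + 1 - k)).find?
        (fun j : Nat => ((m.drop j).take k).all (fun c => c == ".")) = some j := by
      rw [pvRangeFind_eq_some_iff]
      refine ⟨by omega, ?_, ?_⟩
      · have := hj2; unfold pvQ at this
        rw [Bool.and_eq_true] at this
        exact this.2
      · intro i hi
        have hqf := hj3 i hi
        unfold pvQ at hqf
        have hd : decide (i + k ≤ m.length) = true := by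
          simp only [decide_eq_true_iff]; omega
        rw [hd, Bool.true_and] at hqf
        exact hqf
    rw [hfind]
    simp
  | none =>
    have hfind : (List.range (m.length + 1 - k)).find?
        (fun j : Nat => ((m.drop j).take k).all (fun c => c == ".")) = none := by
      rw [pvRangeFind_eq_none_iff]
      intro i hi
      have hqf := (pvRangeFind_eq_none_iff _ _).mp h2 i (by omega)
      unfold pvQ at hqf
      have hd : decide (i + k ≤ m.length) = true := by
        simp only [decide_eq_true_iff]; omega
      rw [hd, Bool.true_and] at hqf
      exact hqf
    rw [hfind]
    simp

-- B's run-length scan, from state (index t, current run r), finds the first fitting window at or after t - r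
lemma pvScan_inv (P : List String) (k : Nat) :
    ∀ n t r : Nat, n = P.length - t → r ≤ t → t ≤ P.length → r < k →
      (∀ u, t - r ≤ u → u < t → P[u]? = some ".") →
      pvGapScan (P.drop t) (k : Int) (t : Int) (r : Int) =
        (match pvFFW P k (t - r) with | some j => (j : Int) | none => -1) := by
  intro n
  induction n with
  | zero =>
    intro t r hn hrt htl hrk hdots
    have ht : t = P.length := by omega
    subst ht
    rw [List.drop_length]
    have hnone : pvFFW P k (P.length - r) = none := by
      unfold pvFFW; rw [pvRangeFind_eq_none_iff]
      intro i hi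
      rcases Nat.lt_or_ge i (P.length - r) with hlo | hlo
      · have hd : decide (P.length - r ≤ i) = false := decide_eq_false (by omega)
        simp only [hd, Bool.false_and]
      · have hq : pvQ P i k = false := by
          cases hq2 : pvQ P i k
          · rfl
          · exfalso
            obtain ⟨hb, -⟩ := (pvQ_iff P i k).mp hq2
            omega
        simp [hq]
    rw [hnone]
    simp [pvGapScan]
  | succ n ih =>
    intro t r hn hrt htl hrk hdots
    have htlt : t < P.length := by omega
    rw [List.drop_eq_getElem_cons htlt]
    by_cases hc : P[t] = "."
    · by_cases hrk1 : r + 1 = k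
      · have hsome : pvFFW P k (t - r) = some (t - r) := by
          unfold pvFFW; rw [pvRangeFind_eq_some_iff]
          refine ⟨by omega, ?_, ?_⟩
          · have hd : decide (t - r ≤ t - r) = true := by simp
            rw [hd, Bool.true_and, pvQ_iff]
            refine ⟨by omega, fun u hu1 hu2 => ?_⟩
            rcases Nat.lt_or_ge u t with hu | hu
            · exact hdots u (by omega) hu
            · have hut : u = t := by omega
              subst hut
              rw [List.getElem?_eq_getElem htlt, hc]
          · intro i hi
            have hd : decide (t - r ≤ i) = false := decide_eq_false (by omega)
            simp only [hd, Bool.false_and]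
        rw [hsome]
        have hbeq : (((r : Int) + 1) == (k : Int)) = true := by
          rw [beq_iff_eq]; omega
        have hceq : (P[t] == ".") = true := by rw [beq_iff_eq]; exact hc
        simp only [pvGapScan, hceq, if_true, hbeq]
        rw [Nat.cast_sub hrt]
        omega
      · have ih' := ih (t+1) (r+1) (by omega) (by omega) (by omega) (by omega)
          (fun u h1 h2 => by
            rcases Nat.lt_or_ge u t with hu | hu
            · exact hdots u (by omega) hu
            · have hut : u = t := by omega
              subst hut
              rw [List.getElem?_eq_getElem htlt, hc])
        have harg : t + 1 - (r + 1) = t - r := by omega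
        rw [harg] at ih'
        push_cast at ih'
        have hceq : (P[t] == ".") = true := by rw [beq_iff_eq]; exact hc
        have hbeq : (((r : Int) + 1) == (k : Int)) = false := by
          rw [beq_eq_false_iff_ne]; omega
        simp only [pvGapScan, hceq, if_true, hbeq]
        exact ih'
    · have ih' := ih (t+1) 0 (by omega) (by omega) (by omega) (by omega)
        (fun u h1 h2 => absurd h2 (by omega))
      have hsame : pvFFW P k (t - r) = pvFFW P k (t + 1 - 0) := by
        unfold pvFFW; congr 1; funext j
        cases hq : pvQ P j k
        · rw [Bool.and_false, Bool.and_false]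
        · obtain ⟨hb, hdot⟩ := (pvQ_iff P j k).mp hq
          have hnomid : ¬ (t - r ≤ j ∧ j ≤ t) := by
            rintro ⟨h1, h2⟩
            have hp : P[t]? = some "." := hdot t (by omega) (by omega)
            rw [List.getElem?_eq_getElem htlt] at hp
            exact hc (by simpa using hp)
          have hiff : (t - r ≤ j) ↔ (t + 1 - 0 ≤ j) := by omega
          rw [decide_eq_decide.mpr hiff]
      rw [hsame]
      push_cast at ih'
      have hceq : (P[t] == ".") = false := by rw [beq_eq_false_iff_ne]; exact hc
      simp only [pvGapScan, hceq]
      exact ih'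

lemma pvB_char (P : List String) (k : Nat) (hk : 1 ≤ k) :
    pvGapScan P (k : Int) 0 0 =
      (match pvFFW P k 0 with | some j => (j : Int) | none => -1) := by
  have h := pvScan_inv P k P.length 0 0 (by omega) (by omega) (by omega) hk
    (fun u h1 h2 => absurd h2 (by omega))
  simpa using h

-- windows of the prefix before the first occurrence of s
-- pvQ on the k0-prefix
lemma pvQ_take (m : List String) (j k k0 : Nat) (hk0 : k0 ≤ m.length) :
    pvQ (m.take k0) j k = true ↔ (j + k ≤ k0 ∧ pvQ m j k = true) := by
  rw [pvQ_iff, pvQ_iff]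
  have hlen : (m.take k0).length = k0 := by simp [List.length_take]; omega
  rw [hlen]
  constructor
  · rintro ⟨hb, hdots⟩
    refine ⟨hb, by omega, fun u h1 h2 => ?_⟩
    have := hdots u h1 h2
    rwa [List.getElem?_take, if_pos (by omega)] at this
  · rintro ⟨hb, -, hdots⟩
    refine ⟨hb, fun u h1 h2 => ?_⟩
    rw [List.getElem?_take, if_pos (by omega)]
    exact hdots u h1 h2

-- an all-dot window starting before the first occurrence of s ends before it
lemma pvQ_cross (m : List String) (s : String) (j k k0 : Nat) (hk : 1 ≤ k)
    (hat : m[k0]? = some s) (hmin : ∀ u, u < k0 → m[u]? ≠ some s)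
    (hq : pvQ m j k = true) (hj : j < k0) : j + k ≤ k0 := by
  by_contra hgt
  obtain ⟨hb, hdots⟩ := (pvQ_iff m j k).mp hq
  have h1 : m[k0]? = some "." := hdots k0 (by omega) (by omega)
  have hs : s = "." := by rw [hat] at h1; exact Option.some.inj h1
  have h2 : m[j]? = some "." := hdots j (by omega) (by omega)
  exact hmin j hj (by rw [h2, hs])

lemma pvFFW_take (m : List String) (s : String) (k k0 : Nat) (hk : 1 ≤ k)
    (hlt : k0 < m.length) (hat : m[k0]? = some s) (hmin : ∀ u, u < k0 → m[u]? ≠ some s) :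
    (∀ j, pvFFW (m.take k0) k 0 = some j ↔ (pvFFW m k 0 = some j ∧ j < k0)) ∧
    (pvFFW (m.take k0) k 0 = none ↔ (∀ j, pvFFW m k 0 = some j → k0 ≤ j)) := by
  have hk0 : k0 ≤ m.length := by omega
  have hlen : (m.take k0).length = k0 := by simp [List.length_take]; omega
  have hsome : ∀ j, pvFFW (m.take k0) k 0 = some j ↔ (pvFFW m k 0 = some j ∧ j < k0) := by
    intro j
    unfold pvFFW
    rw [hlen, pvRangeFind_eq_some_iff, pvRangeFind_eq_some_iff]
    simp only [Nat.zero_le, decide_true, Bool.true_and]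
    constructor
    · rintro ⟨h1, h2, h3⟩
      obtain ⟨hjk, hqm⟩ := (pvQ_take m j k k0 hk0).mp h2
      have hjlt : j < k0 := by omega
      refine ⟨⟨by omega, hqm, fun i hi => ?_⟩, hjlt⟩
      cases hqi : pvQ m i k
      · rfl
      · exfalso
        have hik : i + k ≤ k0 := pvQ_cross m s i k k0 hk hat hmin hqi (by omega)
        have : pvQ (m.take k0) i k = true := (pvQ_take m i k k0 hk0).mpr ⟨hik, hqi⟩
        have := h3 i hi
        rw [this] at ‹pvQ (m.take k0) i k = true›
        simp_all
    · rintro ⟨⟨h1, h2, h3⟩, hjlt⟩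
      have hjk : j + k ≤ k0 := pvQ_cross m s j k k0 hk hat hmin h2 hjlt
      refine ⟨by omega, (pvQ_take m j k k0 hk0).mpr ⟨hjk, h2⟩, fun i hi => ?_⟩
      cases hqi : pvQ (m.take k0) i k
      · rfl
      · exfalso
        obtain ⟨-, hqm⟩ := (pvQ_take m i k k0 hk0).mp hqi
        have := h3 i hi
        rw [this] at hqm
        simp_all
  refine ⟨hsome, ?_⟩
  constructor
  · intro hnone j hj
    by_contra hjlt
    have : pvFFW (m.take k0) k 0 = some j := (hsome j).mpr ⟨hj, by omega⟩
    rw [hnone] at this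
    simp at this
  · intro hall
    cases hT : pvFFW (m.take k0) k 0 with
    | none => rfl
    | some j =>
      exfalso
      obtain ⟨hj, hjlt⟩ := (hsome j).mp hT
      have := hall j hj
      omega

lemma pvPosLen (s : String) : ∀ (m : List String) (st : Int),
    (((PySem.List.enumerate m st).filter (fun p => p.2 == s)).map (fun p => p.1)).length
      = m.count s := by
  intro m
  induction m with
  | nil => intro st; simp [PySem.List.enumerate]
  | cons c cs ih =>
    intro st
    rw [PySem.List.enumerate_cons]
    by_cases h : c = s
    · subst h
      simp only [List.filter_cons, BEq.rfl, if_true, List.map_cons, List.length_cons,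
        List.count_cons, if_true]
      rw [ih]
    · have hb : (c == s) = false := by rw [beq_eq_false_iff_ne]; exact h
      simp only [List.filter_cons, hb, List.count_cons]
      simp only [Bool.false_eq_true, if_false]
      rw [ih]
      simp

lemma pvPosHead (s : String) : ∀ (m : List String) (st : Int) (p0 : Int)
    (rest : List Int),
    ((PySem.List.enumerate m st).filter (fun p => p.2 == s)).map (fun p => p.1) = p0 :: rest →
    ∃ k0 : Nat, p0 = st + (k0 : Int) ∧ m[k0]? = some s ∧ ∀ u, u < k0 → m[u]? ≠ some s := by
  intro m
  induction m with
  | nil => intro st p0 rest h; simp [PySem.List.enumerate] at h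
  | cons c cs ih =>
    intro st p0 rest h
    rw [PySem.List.enumerate_cons] at h
    by_cases hc : c = s
    · subst hc
      simp only [List.filter_cons, BEq.rfl, if_true, List.map_cons, List.cons.injEq] at h
      refine ⟨0, by simpa using h.1.symm, by simp, fun u hu => absurd hu (by omega)⟩
    · have hb : (c == s) = false := by rw [beq_eq_false_iff_ne]; exact hc
      simp only [List.filter_cons, hb, Bool.false_eq_true, if_false] at h
      obtain ⟨k0, h1, h2, h3⟩ := ih (st + 1) p0 rest h
      refine ⟨k0 + 1, by push_cast; omega, by simpa using h2, fun u hu => ?_⟩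
      cases u with
      | zero => simpa using hc
      | succ u =>
        intro hcon
        exact h3 u (by omega) (by simpa using hcon)

-- the two loop bodies agree on every state
lemma pvStep_eq (m : List String) (fid : Int) :
    (let file_size : Int := (PySem.List.count m (PySem.Int.toStr fid) : Int)
     let current_positions :=
       ((PySem.List.enumerate m 0).filter (fun p => p.2 == PySem.Int.toStr fid)).map (fun p => p.1)
     let free_space_index := find_free_space m file_size
     if free_space_index ≠ -1 then
       match PySem.List.pyGet? current_positions 0 with
       | none => m
       | some p0 =>
         if free_space_index < p0 then
           let m' := current_positions.foldl (fun mm pos => PySem.List.pySetD mm pos ".") m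
           (PySem.List.pyRange free_space_index (free_space_index + file_size) 1).foldl
             (fun mm i => PySem.List.pySetD mm i (PySem.Int.toStr fid)) m'
         else m
     else m)
    =
    (let s := PySem.Int.toStr fid
     let pos := ((PySem.List.enumerate m 0).filter (fun p => p.2 == s)).map (fun p => p.1)
     match pos with
     | [] => m
     | p0 :: _ =>
       let size : Int := (pos.length : Int)
       let gap := pvGapScan (PySem.List.slice m none (some p0)) size 0 0
       if gap ≠ -1 then
         let d' := pos.foldl (fun dd p => PySem.List.pySetD dd p ".") m
         (PySem.List.pyRange gap (gap + size) 1).foldl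
           (fun dd i => PySem.List.pySetD dd i s) d'
       else m) := by
  cases hpos : ((PySem.List.enumerate m 0).filter
      (fun p => p.2 == PySem.Int.toStr fid)).map (fun p => p.1) with
  | nil =>
    simp only [hpos, PySem.List.pyGet?]
    split <;> rfl
  | cons p0 rest =>
    obtain ⟨k0, hp0, hat, hmin⟩ := pvPosHead (PySem.Int.toStr fid) m 0 p0 rest hpos
    rw [zero_add] at hp0
    have hk0lt : k0 < m.length := (List.getElem?_eq_some_iff.mp hat).1
    have hcount : PySem.List.count m (PySem.Int.toStr fid) = rest.length + 1 := by
      rw [PySem.List.count_eq, ← pvPosLen (PySem.Int.toStr fid) m 0, hpos]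
      simp
    simp only [hpos, hcount, hp0, List.length_cons, PySem.List.pyGet?_zero_cons,
      PySem.List.slice_to_natCast]
    rw [pvA_char m (rest.length + 1), pvB_char (m.take k0) (rest.length + 1) (by omega)]
    obtain ⟨hsome, hnone⟩ :=
      pvFFW_take m (PySem.Int.toStr fid) (rest.length + 1) k0 (by omega) hk0lt hat hmin
    cases hA : pvFFW m (rest.length + 1) 0 with
    | none =>
      have hT : pvFFW (m.take k0) (rest.length + 1) 0 = none :=
        hnone.mpr (fun j hj => by rw [hA] at hj; exact absurd hj (by simp))
      rw [hT]
      simp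
    | some j =>
      by_cases hj : j < k0
      · have hT := (hsome j).mpr ⟨hA, hj⟩
        rw [hT]
        have h1 : ((j : Int) ≠ -1) := by omega
        have h2 : ((j : Int) < (k0 : Int)) := by omega
        simp [h1, h2]
      · have hT : pvFFW (m.take k0) (rest.length + 1) 0 = none :=
          hnone.mpr (fun j' hj' => by
            rw [hA] at hj'
            injection hj' with hjj
            omega)
        rw [hT]
        have h2 : ¬ ((j : Int) < (k0 : Int)) := by omega
        simp [h2]

-- ===== VERDICT (by name: the statement is the Claim_ definition above) =====
theorem rearrange_disk_2_spec : Claim_equal_rearrange_disk_2 := by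
  intro map _ _
  unfold Spec_rearrange_disk_2 rearrange_disk_2 rearrange_disk_2_alt
  exact PySem.List.foldl_congr_mem' _ _ _ _ (fun fid _ m => pvStep_eq m fid)
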